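-- pv_equiv track=rewrite | github.com/FStru/SocialItemRecommendation | code/myhelper.py | degree_to_object
-- ===== SOURCE A (Python) =====
-- from collections import defaultdict
--
-- def degree_to_object(objectdegree, objectlist):
--     degree_to_object_list = defaultdict(list)
--     degree_to_object_num = defaultdict(int)
--     for object in objectlist:
--         degree_to_object_list[objectdegree[object]].append(object)
--         degree_to_object_num[objectdegree[object]] = degree_to_object_num[objectdegree[object]] + 1
--     degree_to_object_list = dict(sorted(degree_to_object_list.items(), key=lambda x: x[0]))
--     degree_to_object_num = dict(sorted(degree_to_object_num.items(), key=lambda x: x[0]))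
--     return degree_to_object_list, degree_to_object_num
-- ===== SOURCE B (Python) =====
-- def degree_to_object(objectdegree, objectlist):
--     degrees = sorted({objectdegree[o] for o in objectlist})
--     degree_to_object_list = {d: [o for o in objectlist if objectdegree[o] == d] for d in degrees}
--     degree_to_object_num = {d: len(g) for d, g in degree_to_object_list.items()}
--     return degree_to_object_list, degree_to_object_num
-- ===== Notes on version B (the rewrite author's own statement) =====
-- stated objective: simpler
-- what changed: Instead of one pass appending into two defaultdicts and then sorting each dict's items by key, B computes the sorted set of distinct degrees once and builds both dicts by a filter comprehension per degree (counts from the group lengths).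
import Mathlib
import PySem

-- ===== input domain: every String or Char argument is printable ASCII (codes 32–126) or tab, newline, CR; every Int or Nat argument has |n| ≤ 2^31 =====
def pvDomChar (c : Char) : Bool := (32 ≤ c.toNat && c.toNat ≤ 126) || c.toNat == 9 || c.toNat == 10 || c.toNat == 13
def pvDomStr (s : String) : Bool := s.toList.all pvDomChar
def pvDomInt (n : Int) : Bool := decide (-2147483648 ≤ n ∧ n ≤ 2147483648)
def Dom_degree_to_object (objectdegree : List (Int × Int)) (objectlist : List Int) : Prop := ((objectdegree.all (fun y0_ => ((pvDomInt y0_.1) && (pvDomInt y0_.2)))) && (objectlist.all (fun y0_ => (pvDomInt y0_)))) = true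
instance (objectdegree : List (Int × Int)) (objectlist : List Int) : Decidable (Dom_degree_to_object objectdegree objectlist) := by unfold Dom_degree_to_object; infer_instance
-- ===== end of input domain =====

-- B replaces A's one-pass defaultdict accumulation (then item-sort) by sorted distinct degrees
-- with one filter comprehension per degree: simpler, same return value.


-- objectdegree[o]: Python dict lookup; inside Pre_ every o is a key, so getD's default is never used
def pvDeg (objectdegree : List (Int × Int)) (o : Int) : Int :=
  (PySem.Dict.mk objectdegree).getD o 0

-- ===== PORT A =====
def degree_to_object (objectdegree : List (Int × Int)) (objectlist : List Int) : (List (Int × List Int)) × (List (Int × Int)) :=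
  -- one pass over objectlist updating both defaultdicts, then each dict's items sorted by key
  let s := objectlist.foldl
    (fun (s : PySem.Dict Int (List Int) × PySem.Dict Int Int) o =>
      (s.1.modify (pvDeg objectdegree o) [] (· ++ [o]),
       s.2.modify (pvDeg objectdegree o) 0 (· + 1)))
    (PySem.Dict.empty, PySem.Dict.empty)
  (PySem.List.sorted s.1.items (fun x => x.1) false,
   PySem.List.sorted s.2.items (fun x => x.1) false)

-- ===== PORT B =====
def degree_to_object_alt (objectdegree : List (Int × Int)) (objectlist : List Int) : (List (Int × List Int)) × (List (Int × Int)) :=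
  let degrees := PySem.List.sorted (PySem.Set.ofList (objectlist.map (pvDeg objectdegree))) (fun x => x) false
  let lst := degrees.map (fun d => (d, objectlist.filter (fun o => pvDeg objectdegree o == d)))
  (lst, lst.map (fun p => (p.1, (p.2.length : Int))))

-- ===== PRECONDITION & SPEC =====
-- Pre_ excludes exactly the inputs where objectdegree[o] raises KeyError (in A and in B alike)
def Pre_degree_to_object (objectdegree : List (Int × Int)) (objectlist : List Int) : Prop :=
  ∀ o ∈ objectlist, o ∈ objectdegree.map Prod.fst
instance (objectdegree : List (Int × Int)) (objectlist : List Int) : Decidable (Pre_degree_to_object objectdegree objectlist) := by unfold Pre_degree_to_object; infer_instance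
def pvWitness_degree_to_object : (List (Int × Int)) × List Int := ([(1, 2), (3, 2), (0, 1)], [0, 1, 3, 1])

def Spec_degree_to_object (objectdegree : List (Int × Int)) (objectlist : List Int) (out : (List (Int × List Int)) × (List (Int × Int))) : Prop := out = degree_to_object_alt objectdegree objectlist
instance (objectdegree : List (Int × Int)) (objectlist : List Int) (out : (List (Int × List Int)) × (List (Int × Int))) : Decidable (Spec_degree_to_object objectdegree objectlist out) := by unfold Spec_degree_to_object; infer_instance

-- ===== CLAIM (what is proved, stated in full; the proofs are below) =====
def Claim_equal_degree_to_object : Prop := ∀ (objectdegree : List (Int × Int)) (objectlist : List Int), Dom_degree_to_object objectdegree objectlist → Pre_degree_to_object objectdegree objectlist → Spec_degree_to_object objectdegree objectlist (degree_to_object objectdegree objectlist)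

-- ===== LEMMAS AND PROOFS =====
-- items of A's list-accumulating defaultdict: distinct degrees in first-occurrence order, each with its filtered group
theorem pv_dl_items (od : List (Int × Int)) (ol : List Int) :
    (ol.foldl (fun (d : PySem.Dict Int (List Int)) o => d.modify (pvDeg od o) [] (· ++ [o])) PySem.Dict.empty).items
      = (PySem.Set.ofList (ol.map (pvDeg od))).map
          (fun k => (k, ol.filter (fun o => pvDeg od o == k))) := by
  have hk : (ol.foldl (fun (d : PySem.Dict Int (List Int)) o => d.modify (pvDeg od o) [] (· ++ [o])) PySem.Dict.empty).keys
      = PySem.Set.ofList (ol.map (pvDeg od)) := by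
    rw [PySem.Dict.keys_foldl_modify_key ol (pvDeg od) [] (fun _ o => (· ++ [o]))]
    simp [PySem.Set.update, PySem.Set.ofList_eq_foldl]
  have hnd : (ol.foldl (fun (d : PySem.Dict Int (List Int)) o => d.modify (pvDeg od o) [] (· ++ [o])) PySem.Dict.empty).keys.Nodup :=
    PySem.Dict.nodup_keys_foldl_modify_key ol (pvDeg od) [] (fun _ o => (· ++ [o])) _ (by simp)
  have hg : ∀ c, (ol.foldl (fun (d : PySem.Dict Int (List Int)) o => d.modify (pvDeg od o) [] (· ++ [o])) PySem.Dict.empty).getD c []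
      = ol.filter (fun o => pvDeg od o == c) := by
    intro c
    have : ol.foldl (fun (d : PySem.Dict Int (List Int)) o => d.modify (pvDeg od o) [] (· ++ [o])) PySem.Dict.empty
        = (ol.map (fun o => (pvDeg od o, o))).foldl (fun d p => d.modify p.1 [] (· ++ [p.2])) PySem.Dict.empty := by
      rw [List.foldl_map]
    rw [this, PySem.Dict.getD_foldl_modify_append]
    simp [List.filter_map, Function.comp_def]
  rw [PySem.Dict.items_eq_map_keys _ hnd [], hk]
  exact List.map_congr_left (fun k _ => by rw [hg k])

-- items of A's counting defaultdict: the same degrees, each with its group size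
theorem pv_dn_items (od : List (Int × Int)) (ol : List Int) :
    (ol.foldl (fun (d : PySem.Dict Int Int) o => d.modify (pvDeg od o) 0 (· + 1)) PySem.Dict.empty).items
      = (PySem.Set.ofList (ol.map (pvDeg od))).map
          (fun k => (k, ((ol.filter (fun o => pvDeg od o == k)).length : Int))) := by
  have : (ol.foldl (fun (d : PySem.Dict Int Int) o => d.modify (pvDeg od o) 0 (· + 1)) PySem.Dict.empty)
      = PySem.Dict.counter (ol.map (pvDeg od)) := by
    rw [PySem.Dict.counter_eq_foldl, List.foldl_map]
  rw [this, PySem.Dict.items_counter]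
  refine List.map_congr_left (fun k _ => ?_)
  congr 1
  rw [List.count_eq_countP, List.countP_map, List.countP_eq_length_filter]
  rfl

theorem degree_to_object_eq_alt (od : List (Int × Int)) (ol : List Int) :
    degree_to_object od ol = degree_to_object_alt od ol := by
  show ((PySem.List.sorted (ol.foldl
        (fun (s : PySem.Dict Int (List Int) × PySem.Dict Int Int) o =>
          (s.1.modify (pvDeg od o) [] (· ++ [o]), s.2.modify (pvDeg od o) 0 (· + 1)))
        (PySem.Dict.empty, PySem.Dict.empty)).1.items (fun x => x.1) false,
      PySem.List.sorted (ol.foldl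
        (fun (s : PySem.Dict Int (List Int) × PySem.Dict Int Int) o =>
          (s.1.modify (pvDeg od o) [] (· ++ [o]), s.2.modify (pvDeg od o) 0 (· + 1)))
        (PySem.Dict.empty, PySem.Dict.empty)).2.items (fun x => x.1) false)
      : (List (Int × List Int)) × (List (Int × Int)))
    = (let degrees := PySem.List.sorted (PySem.Set.ofList (ol.map (pvDeg od))) (fun x => x) false
       let lst := degrees.map (fun d => (d, ol.filter (fun o => pvDeg od o == d)))
       (lst, lst.map (fun p => (p.1, (p.2.length : Int)))))
  have hsplit := PySem.List.foldl_prod_mk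
    (fun (d : PySem.Dict Int (List Int)) o => d.modify (pvDeg od o) [] (· ++ [o]))
    (fun (d : PySem.Dict Int Int) o => d.modify (pvDeg od o) 0 (· + 1))
    ol PySem.Dict.empty PySem.Dict.empty
  rw [hsplit]
  simp only [pv_dl_items, pv_dn_items, List.map_map]
  have hperm := PySem.List.sorted_perm (PySem.Set.ofList (ol.map (pvDeg od))) (fun x => x) false
  have hpw := PySem.List.sorted_ofList_pairwise_lt (ol.map (pvDeg od))
  simp only [Function.comp_def]
  rw [Prod.mk.injEq]
  refine ⟨?_, ?_⟩ <;>
  · apply PySem.List.sorted_eq_of_perm_of_pairwise_lt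
    · exact hperm.map _
    · exact (List.pairwise_map).2 (hpw.imp (fun h => h))

-- ===== VERDICT (by name: the statement is the Claim_ definition above) =====
theorem degree_to_object_spec : Claim_equal_degree_to_object := by
  intro od ol _ _
  unfold Spec_degree_to_object
  exact degree_to_object_eq_alt od ol
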